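-- pv_equiv track=rewrite | github.com/xingetouzi/fxdayu_alphaman | fxdayu_alphaman/selector/admin.py | max_combination
-- ===== SOURCE A (Python) =====
-- def max_combination(alist, max_order=1):
--
--     """
--     输入一个列表,输出列表当中的指定阶数下(含该阶数)的所有组合方案。
--
--     :param alist: 任意列表(list) 如[1,2,3]
--     :param order: 组合的最大阶数 (int) 如2
--     :return: 组合方案(list),当中的元素为元组(tuple),代表一种组合方案
--              形如[(1,),(2,),(3,),(1,2,),(1,3,),(2,3,)] (含1阶组合和2阶组合)
--     """
--     import itertools
--
--     if max_order > len(alist):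
--         max_order = len(alist)
--     result = []
--     for i in range(1, max_order + 1):
--         result.extend(list(itertools.combinations(alist, i)))
--     return result
-- ===== SOURCE B (Python) =====
-- def max_combination(alist, max_order=1):
--     # Bottom-up DP over suffixes, no itertools and no recursion:
--     # chunks[k] is a list of blocks; concatenated, the blocks give all
--     # k-element combinations of the current suffix in index-lexicographic
--     # order (k capped at max_order). Prepending a block per step avoids
--     # recopying the previous layer.
--     if max_order > len(alist):
--         max_order = len(alist)
--     chunks = [[[()]]]
--     for x in reversed(alist):
--         new = [[[()]]]
--         for k in range(1, min(len(chunks), max_order) + 1):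
--             prev = chunks[k - 1]
--             block = [(x,) + c for blk in prev for c in blk]
--             rest = chunks[k] if k < len(chunks) else []
--             new.append([block] + rest)
--         chunks = new
--     result = []
--     for i in range(1, max_order + 1):
--         for blk in chunks[i]:
--             result.extend(blk)
--     return result
-- ===== Notes on version B (the rewrite author's own statement) =====
-- stated objective: alternative
-- what changed: Replaces the per-size itertools.combinations calls with a bottom-up dynamic-programming table built in one right-to-left pass over the list: layers[k] holds all k-element combinations of the current suffix (k capped at max_order), and the answer is read off the final table.
import Mathlib
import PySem

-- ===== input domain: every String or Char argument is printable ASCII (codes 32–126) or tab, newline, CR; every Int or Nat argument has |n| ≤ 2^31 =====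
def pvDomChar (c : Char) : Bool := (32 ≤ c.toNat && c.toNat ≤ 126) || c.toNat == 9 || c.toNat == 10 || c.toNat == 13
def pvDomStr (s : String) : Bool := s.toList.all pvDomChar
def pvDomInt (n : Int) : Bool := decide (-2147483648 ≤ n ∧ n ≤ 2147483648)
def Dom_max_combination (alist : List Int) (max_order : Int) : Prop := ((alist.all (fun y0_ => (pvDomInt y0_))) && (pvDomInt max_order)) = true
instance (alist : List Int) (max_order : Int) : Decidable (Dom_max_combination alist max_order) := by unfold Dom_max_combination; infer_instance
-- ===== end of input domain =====

-- B builds a dynamic-programming table of combinations per size in one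
-- right-to-left pass instead of calling itertools per size (objective: alternative).

-- ===== PORT A =====
-- itertools.combinations(alist, i) ported as PySem.List.combinations (exact order).
def max_combination (alist : List Int) (max_order : Int) : List (List Int) :=
  let m := if max_order > (alist.length : Int) then (alist.length : Int) else max_order
  (PySem.List.pyRange 1 (m + 1) 1).foldl
    (fun result i => result ++ PySem.List.combinations alist i.toNat) []

-- ===== PORT B =====
-- inner `for k in range(1, min(len(chunks), max_order)+1)` loop of Source B: each
-- new layer is one fresh block prepended to the previous layer's block list
def pvStepB (max_order : Int) (x : Int) (chunks : List (List (List (List Int)))) : List (List (List (List Int))) :=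
  (PySem.List.pyRange 1 (min ((chunks.length : Int)) max_order + 1) 1).foldl
    (fun new k =>
      let prev := PySem.List.pyGetD chunks (k - 1) []
      let block := prev.flatMap (fun blk => blk.map (fun c => x :: c))
      let rest := if k < (chunks.length : Int) then PySem.List.pyGetD chunks k [] else []
      new ++ [[block] ++ rest])
    [[[[]]]]

def max_combination_alt (alist : List Int) (max_order : Int) : List (List Int) :=
  let m := if max_order > (alist.length : Int) then (alist.length : Int) else max_order
  let chunks := alist.reverse.foldl (fun chunks x => pvStepB m x chunks) [[[[]]]]
  (PySem.List.pyRange 1 (m + 1) 1).foldl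
    (fun result i =>
      (PySem.List.pyGetD chunks i []).foldl (fun result blk => result ++ blk) result) []

-- ===== PRECONDITION & SPEC =====
def Spec_max_combination (alist : List Int) (max_order : Int) (out : List (List Int)) : Prop := out = max_combination_alt alist max_order
instance (alist : List Int) (max_order : Int) (out : List (List Int)) : Decidable (Spec_max_combination alist max_order out) := by unfold Spec_max_combination; infer_instance

-- ===== CLAIM (what is proved, stated in full; the proofs are below) =====
def Claim_equal_max_combination : Prop := ∀ (alist : List Int) (max_order : Int), Dom_max_combination alist max_order → Spec_max_combination alist max_order (max_combination alist max_order)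

-- ===== LEMMAS AND PROOFS =====

-- Closed form of B's layer k: one block per choice of the first element.
def pvChunksC (xs : List Int) : Nat → List (List (List Int))
  | 0 => [[[]]]
  | k + 1 => (List.range (xs.length - k)).map
      (fun j => (PySem.List.combinations (xs.drop (j + 1)) k).map (fun c => xs.getD j 0 :: c))

theorem pvChunksC_nil_of_lt (xs : List Int) (k : Nat) (h : xs.length ≤ k) :
    pvChunksC xs (k + 1) = [] := by
  simp only [pvChunksC]
  rw [Nat.sub_eq_zero_of_le h]
  rfl

theorem pvChunksC_cons (x : Int) (xs : List Int) (k : Nat) (hk : k ≤ xs.length) :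
    pvChunksC (x :: xs) (k + 1)
      = ((PySem.List.combinations xs k).map (fun c => x :: c)) :: pvChunksC xs (k + 1) := by
  simp only [pvChunksC]
  have hlen : (x :: xs).length - k = (xs.length - k) + 1 := by simp; omega
  rw [hlen, List.range_succ_eq_map, List.map_cons, List.map_map]
  refine List.cons_eq_cons.mpr ⟨by simp, List.map_congr_left ?_⟩
  intro j _
  simp [Function.comp]

theorem pvChunksC_flatten (xs : List Int) : ∀ (k : Nat),
    (pvChunksC xs k).flatten = PySem.List.combinations xs k := by
  induction xs with
  | nil =>
      intro k
      cases k with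
      | zero => simp [pvChunksC, PySem.List.combinations_zero]
      | succ k => simp [pvChunksC, PySem.List.combinations_nil_succ]
  | cons x ys ih =>
      intro k
      cases k with
      | zero => simp [pvChunksC, PySem.List.combinations_zero]
      | succ k =>
          by_cases hk : k ≤ ys.length
          · rw [pvChunksC_cons x ys k hk, List.flatten_cons, ih (k + 1),
              PySem.List.combinations_cons_succ]
          · rw [pvChunksC_nil_of_lt _ _ (by simp; omega),
              PySem.List.combinations_eq_nil_of_length_lt _ (by simp; omega)]
            rfl

-- One DP step: from the (capped) chunk table for xs to the table for x :: xs.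
theorem pvStepB_table (mo x : Int) (xs : List Int) :
    pvStepB mo x ((List.range (min xs.length mo.toNat + 1)).map (fun k => pvChunksC xs k))
      = (List.range (min (xs.length + 1) mo.toNat + 1)).map (fun k => pvChunksC (x :: xs) k) := by
  by_cases hmo : 0 ≤ mo
  · unfold pvStepB
    rw [PySem.List.foldl_append_singleton_eq_map]
    set L := min xs.length mo.toNat with hL
    have hlen : (((List.range (L + 1)).map (fun k => pvChunksC xs k)).length : Int)
        = (L : Int) + 1 := by simp
    rw [hlen]
    set K := min (xs.length + 1) mo.toNat with hK
    have hmin : min ((L : Int) + 1) mo = (K : Int) := by omega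
    rw [hmin, PySem.List.pyRange_one]
    have hcnt : (((K : Int) + 1 - 1)).toNat = K := by omega
    rw [hcnt, List.map_map]
    have hr : List.range (K + 1) = 0 :: (List.range K).map Nat.succ := List.range_succ_eq_map
    rw [hr, List.map_cons, List.map_map]
    refine List.cons_eq_cons.mpr ⟨by simp [pvChunksC], List.map_congr_left ?_⟩
    intro j hj
    have hjlt : j < K := List.mem_range.mp hj
    have hjL : j ≤ L := by omega
    simp only [Function.comp]
    have hidx1 : (1 : Int) + (j : Int) - 1 = (j : Int) := by ring
    have hprev : PySem.List.pyGetD ((List.range (L + 1)).map (fun k => pvChunksC xs k))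
        ((1 : Int) + (j : Int) - 1) [] = pvChunksC xs j := by
      rw [hidx1, PySem.List.pyGetD_of_nonneg _ _ (by positivity)]
      simpa using PySem.List.getD_map_range (fun k => pvChunksC xs k) _ j [] (by omega)
    have hblock : (pvChunksC xs j).flatMap (fun blk => blk.map (fun c => x :: c))
        = (PySem.List.combinations xs j).map (fun c => x :: c) := by
      rw [List.flatMap_def, ← List.map_flatten, pvChunksC_flatten]
    have hrest : (if (1 : Int) + (j : Int) < (L : Int) + 1 then
        PySem.List.pyGetD ((List.range (L + 1)).map (fun k => pvChunksC xs k))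
          ((1 : Int) + (j : Int)) [] else []) = pvChunksC xs (j + 1) := by
      split_ifs with h
      · rw [PySem.List.pyGetD_of_nonneg _ _ (by positivity)]
        have hcast : ((1 : Int) + (j : Int)).toNat = j + 1 := by omega
        rw [hcast]
        exact PySem.List.getD_map_range (fun k => pvChunksC xs k) _ (j + 1) [] (by omega)
      · exact (pvChunksC_nil_of_lt xs j (by omega)).symm
    rw [hprev, hblock, hrest, Nat.succ_eq_add_one, List.singleton_append,
      pvChunksC_cons x xs j (by omega)]
  · -- max_order < 0: the inner loop is empty and both tables are just the size-0 layer
    have h0 : mo.toNat = 0 := by omega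
    unfold pvStepB
    rw [h0]
    have hnil : PySem.List.pyRange 1
        (min ((((List.range (min xs.length 0 + 1)).map (fun k => pvChunksC xs k)).length : Int)) mo + 1) 1 = [] := by
      apply PySem.List.pyRange_one_eq_nil
      simp only [List.length_map, List.length_range]
      omega
    rw [hnil]
    simp [pvChunksC]

-- The whole chunk table after the right-to-left pass.
theorem pvLayers_table (mo : Int) (alist : List Int) :
    alist.reverse.foldl (fun chunks x => pvStepB mo x chunks) [[[[]]]]
      = (List.range (min alist.length mo.toNat + 1)).map (fun k => pvChunksC alist k) := by
  rw [List.foldl_reverse]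
  induction alist with
  | nil => simp [pvChunksC]
  | cons x xs ih =>
      simp only [List.foldr_cons, ih]
      exact pvStepB_table mo x xs

-- ===== VERDICT (by name: the statement is the Claim_ definition above) =====
theorem max_combination_spec : Claim_equal_max_combination := by
  intro alist max_order _
  simp only [Spec_max_combination, max_combination, max_combination_alt]
  set m : Int := if max_order > (alist.length : Int) then (alist.length : Int) else max_order with hm
  have hmn : m ≤ (alist.length : Int) := by
    rw [hm]; split_ifs with h <;> omega
  rw [pvLayers_table]
  refine PySem.List.foldl_congr_mem _ _ _ _ (fun acc i hi => ?_)
  have h := (PySem.List.mem_pyRange_one).1 hi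
  have h0 : (0 : Int) ≤ i := by omega
  have hlt : i.toNat < min alist.length m.toNat + 1 := by omega
  rw [PySem.List.pyGetD_of_nonneg _ _ h0,
    PySem.List.getD_map_range (fun k => pvChunksC alist k) _ i.toNat [] hlt,
    PySem.List.foldl_append_eq_flatten, pvChunksC_flatten]
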